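-- pv_equiv track=rewrite | github.com/aridepai17/NEETCODE-ROADMAP | ARRAYS AND HASHING/countthenumberofconsistentstrings.py | countConsistentStrings1
-- ===== SOURCE A (Python) =====
-- def countConsistentStrings1(allowed, words):
--     allowed = set(allowed)
--     count = len(words)
--
--     for word in words:
--         for char in word:
--             if char not in allowed:
--                 count -= 1
--                 break
--
--     return count
-- ===== SOURCE B (Python) =====
-- def countConsistentStrings1(allowed, words):
--     amask = 0
--     for c in allowed:
--         amask |= 1 << ord(c)
--     total = 0
--     for word in words:
--         m = amask
--         for c in word:
--             m |= 1 << ord(c)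
--         total += m == amask
--     return total
-- ===== Notes on version B (the rewrite author's own statement) =====
-- stated objective: alternative
-- what changed: Encodes the allowed characters as an integer bitmask (bit ord(c)) and, for each word, ORs its character bits into the allowed mask, counting upward the words whose OR leaves the mask unchanged; no set, no membership test, no break.
import Mathlib
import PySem

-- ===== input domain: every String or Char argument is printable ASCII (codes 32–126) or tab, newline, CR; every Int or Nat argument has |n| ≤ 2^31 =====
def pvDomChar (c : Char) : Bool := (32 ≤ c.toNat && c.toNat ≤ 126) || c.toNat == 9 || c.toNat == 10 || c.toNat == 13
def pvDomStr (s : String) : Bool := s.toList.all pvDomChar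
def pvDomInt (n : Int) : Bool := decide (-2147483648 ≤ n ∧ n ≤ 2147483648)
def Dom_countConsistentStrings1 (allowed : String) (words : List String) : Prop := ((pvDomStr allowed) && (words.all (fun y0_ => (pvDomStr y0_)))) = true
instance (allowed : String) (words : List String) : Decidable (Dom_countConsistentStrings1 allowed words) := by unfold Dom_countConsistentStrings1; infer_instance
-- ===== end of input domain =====

-- B replaces A's set + per-character membership scan with break by an integer-bitmask algorithm:
-- allowed becomes a mask of bits 1<<ord(c); a word is consistent iff OR-ing its character bits
-- into the mask leaves it unchanged; consistent words are counted upward. Same O(total chars) cost.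

-- ===== PORT A =====
-- inner 'for char in word: if char not in allowed: count -= 1; break' — true ⟺ the break fired
def pvScanBad (allowed : PySem.Set Char) : List Char → Bool
  | [] => false
  | c :: cs => if !(PySem.Set.contains allowed c) then true else pvScanBad allowed cs

def countConsistentStrings1 (allowed : String) (words : List String) : Int :=
  let allowedSet : PySem.Set Char := PySem.Set.ofList allowed.toList
  words.foldl (fun count word =>
    if pvScanBad allowedSet word.toList then count - 1 else count) (words.length : Int)

-- ===== PORT B =====
-- m |= 1 << ord(c)
def pvMaskAdd (m : Nat) (c : Char) : Nat := m ||| (1 <<< c.toNat)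

def countConsistentStrings1_alt (allowed : String) (words : List String) : Int :=
  let amask : Nat := allowed.toList.foldl pvMaskAdd 0
  words.foldl (fun total word =>
    total + (if word.toList.foldl pvMaskAdd amask == amask then 1 else 0)) (0 : Int)

-- ===== PRECONDITION & SPEC =====
def Spec_countConsistentStrings1 (allowed : String) (words : List String) (out : Int) : Prop := out = countConsistentStrings1_alt allowed words
instance (allowed : String) (words : List String) (out : Int) : Decidable (Spec_countConsistentStrings1 allowed words out) := by unfold Spec_countConsistentStrings1; infer_instance

-- ===== CLAIM (what is proved, stated in full; the proofs are below) =====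
def Claim_equal_countConsistentStrings1 : Prop := ∀ (allowed : String) (words : List String), Dom_countConsistentStrings1 allowed words → Spec_countConsistentStrings1 allowed words (countConsistentStrings1 allowed words)

-- ===== LEMMAS AND PROOFS =====

theorem char_toNat_inj {c d : Char} (h : c.toNat = d.toNat) : c = d :=
  Char.ext (UInt32.toNat_inj.mp h)

-- bit k of a mask-fold: set iff it was set initially or some char has code k
theorem testBit_foldl_maskAdd (cs : List Char) (m0 : Nat) (k : Nat) :
    (cs.foldl pvMaskAdd m0).testBit k = (m0.testBit k || cs.any (fun c => c.toNat == k)) := by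
  induction cs generalizing m0 with
  | nil => simp
  | cons c cs ih =>
    simp only [List.foldl_cons, List.any_cons, ih, pvMaskAdd, Nat.testBit_or,
      Nat.one_shiftLeft, Nat.testBit_two_pow]
    by_cases h : c.toNat = k
    · simp [h]
    · have hb : (c.toNat == k) = false := by simp [h]
      simp [hb, h]

-- bit c of the allowed mask ⟺ c is an allowed character
theorem testBit_amask (allowed : List Char) (c : Char) :
    (allowed.foldl pvMaskAdd 0).testBit c.toNat = true ↔ c ∈ allowed := by
  rw [testBit_foldl_maskAdd]
  simp only [Nat.zero_testBit, Bool.false_or, List.any_eq_true, beq_iff_eq]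
  exact ⟨fun ⟨d, hd, h⟩ => (char_toNat_inj h) ▸ hd, fun h => ⟨c, h, rfl⟩⟩

-- OR-ing a word into the allowed mask leaves it unchanged ⟺ every char is allowed
theorem foldl_maskAdd_eq_iff (allowed : List Char) (w : List Char) :
    (w.foldl pvMaskAdd (allowed.foldl pvMaskAdd 0) = allowed.foldl pvMaskAdd 0)
      ↔ ∀ c ∈ w, c ∈ allowed := by
  constructor
  · intro h c hc
    have hw : w.any (fun d => d.toNat == c.toNat) = true := by
      simp only [List.any_eq_true]; exact ⟨c, hc, by simp⟩
    have ht := congrArg (fun n => n.testBit c.toNat) h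
    simp only [testBit_foldl_maskAdd, Nat.zero_testBit, Bool.false_or, hw, Bool.or_true] at ht
    have hall : allowed.any (fun d => d.toNat == c.toNat) = true := by
      cases hx : allowed.any (fun d => d.toNat == c.toNat)
      · rw [hx] at ht; exact Bool.noConfusion ht
      · rfl
    obtain ⟨d, hd, he⟩ := List.any_eq_true.mp hall
    exact char_toNat_inj (beq_iff_eq.mp he) ▸ hd
  · intro h
    apply Nat.eq_of_testBit_eq
    intro k
    rw [testBit_foldl_maskAdd]
    by_cases hk : (allowed.foldl pvMaskAdd 0).testBit k = true
    · simp [hk]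
    · simp only [Bool.not_eq_true] at hk
      rw [hk, Bool.false_or]
      rw [List.any_eq_false]
      intro c hc
      have hc' := (testBit_amask allowed c).mpr (h c hc)
      simp only [beq_iff_eq]
      intro he
      rw [he] at hc'
      rw [hc'] at hk
      exact Bool.noConfusion hk
  
-- A's break-scan does not fire exactly on words all of whose characters are allowed
theorem pvScanBad_iff (s : PySem.Set Char) (cs : List Char) :
    pvScanBad s cs = false ↔ ∀ c ∈ cs, c ∈ s := by
  induction cs with
  | nil => simp [pvScanBad]
  | cons c cs ih =>
    cases hcon : PySem.Set.contains s c with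
    | true =>
      have hm : c ∈ s := (PySem.Set.contains_iff s c).mp hcon
      simp [pvScanBad, ih, hm]
    | false =>
      have hm : c ∉ s := fun h => by
        rw [(PySem.Set.contains_iff s c).mpr h] at hcon; exact Bool.noConfusion hcon
      simp only [pvScanBad, hcon, Bool.not_false]
      constructor
      · intro habs; simp at habs
      · intro habs; exact (hm (habs c (List.mem_cons_self ..))).elim

-- A's decrementing fold from n equals n minus the count of bad words
theorem foldl_dec_eq (s : PySem.Set Char) (ws : List String) (n : Int) :
    ws.foldl (fun count word => if pvScanBad s word.toList then count - 1 else count) n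
      = n - (ws.countP (fun word => pvScanBad s word.toList) : Nat) := by
  induction ws generalizing n with
  | nil => simp
  | cons w ws ih =>
    by_cases h : pvScanBad s w.toList = true
    · simp [List.foldl_cons, h, ih]; ring
    · simp [List.foldl_cons, h, ih]

-- B's incrementing fold equals the count of consistent words
theorem foldl_inc_eq (p : String → Bool) (ws : List String) (n : Int) :
    ws.foldl (fun total word => total + (if p word then 1 else 0)) n
      = n + (ws.countP p : Nat) := by
  induction ws generalizing n with
  | nil => simp
  | cons w ws ih =>
    by_cases h : p w = true
    · simp [List.foldl_cons, h, ih]; ring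
    · simp [List.foldl_cons, h, ih]

-- ===== VERDICT (by name: the statement is the Claim_ definition above) =====
theorem countConsistentStrings1_spec : Claim_equal_countConsistentStrings1 := by
  intro allowed words _
  unfold Spec_countConsistentStrings1 countConsistentStrings1 countConsistentStrings1_alt
  simp only [foldl_dec_eq, foldl_inc_eq]
  have hsplit := List.length_eq_countP_add_countP
    (p := fun word => pvScanBad (PySem.Set.ofList allowed.toList) word.toList) (l := words)
  have hgood : words.countP (fun word =>
      word.toList.foldl pvMaskAdd (allowed.toList.foldl pvMaskAdd 0)
        == allowed.toList.foldl pvMaskAdd 0)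
      = words.countP (fun word => ¬ pvScanBad (PySem.Set.ofList allowed.toList) word.toList = true) := by
    apply List.countP_congr
    intro w _
    simp only [beq_iff_eq, decide_eq_true_eq, Bool.not_eq_true]
    rw [foldl_maskAdd_eq_iff, pvScanBad_iff]
    simp [PySem.Set.mem_ofList]
  omega
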